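-- pv_equiv track=rewrite | github.com/deepmodeling/tbplas | tbplas/builder/base.py | check_conj
-- ===== SOURCE A (Python) =====
-- from typing import List, Tuple, Union, Dict, Any, Iterable
--
-- def check_conj(hop_ind: Tuple[int, ...], i: int = 0) -> bool:
--     """
--     Check whether to take the conjugate part of the hopping term.
--
--     :param hop_ind: (r_a, r_b, r_c, orb_i, orb_j), hopping index
--     :param i: component index
--     :return: whether to take conjugate
--     """
--     if hop_ind[i] > 0:
--         return False
--     elif hop_ind[i] < 0:
--         return True
--     else:
--         if i < 2:
--             return check_conj(hop_ind, i+1)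
--         else:
--             return hop_ind[3] > hop_ind[4]
-- ===== SOURCE B (Python) =====
-- def check_conj(hop_ind, i=0):
--     """Iterative re-implementation: scan components from i with an explicit loop."""
--     j = i
--     v = hop_ind[j]
--     while v == 0 and j < 2:
--         j += 1
--         v = hop_ind[j]
--     if v != 0:
--         return v < 0
--     return hop_ind[3] > hop_ind[4]
-- ===== Notes on version B (the rewrite author's own statement) =====
-- stated objective: simpler
-- what changed: Replaces A's tail recursion over the component index with a single explicit while-loop that carries the current index and component value, then one final comparison.
import Mathlib
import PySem

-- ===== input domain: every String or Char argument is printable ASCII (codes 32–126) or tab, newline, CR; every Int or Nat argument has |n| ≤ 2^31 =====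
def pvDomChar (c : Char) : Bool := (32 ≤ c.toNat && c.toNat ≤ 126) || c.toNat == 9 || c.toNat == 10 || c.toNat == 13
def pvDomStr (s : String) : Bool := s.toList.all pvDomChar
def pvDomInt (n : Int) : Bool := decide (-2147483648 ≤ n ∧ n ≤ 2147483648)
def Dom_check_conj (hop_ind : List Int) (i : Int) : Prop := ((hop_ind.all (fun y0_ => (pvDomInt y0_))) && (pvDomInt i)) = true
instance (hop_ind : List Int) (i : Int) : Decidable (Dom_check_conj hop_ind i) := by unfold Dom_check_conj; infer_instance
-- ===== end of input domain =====

-- B replaces A's recursion by an explicit while-loop over the component index (objective: simpler / iterative decomposition); same return values.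
-- Ports use pyGetD with default 0: under Pre_check_conj every index access is in range, so the default is never read.

-- ===== PORT A =====
-- literal port of A's recursion; hop_ind[i] read via pyGetD (in range under Pre_)
def check_conj (hop_ind : List Int) (i : Int) : Bool :=
  let v := PySem.List.pyGetD hop_ind i 0
  if v > 0 then false
  else if v < 0 then true
  else if i < 2 then check_conj hop_ind (i + 1)
  else decide (PySem.List.pyGetD hop_ind 3 0 > PySem.List.pyGetD hop_ind 4 0)
termination_by (2 - i).toNat
decreasing_by omega

-- ===== PORT B =====
-- the while-loop of Source B: state (j, v), runs while v == 0 and j < 2, returns the final v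
def checkConjLoop (hop_ind : List Int) (j : Int) (v : Int) : Int :=
  if v = 0 ∧ j < 2 then
    checkConjLoop hop_ind (j + 1) (PySem.List.pyGetD hop_ind (j + 1) 0)
  else v
termination_by (2 - j).toNat
decreasing_by omega

def check_conj_alt (hop_ind : List Int) (i : Int) : Bool :=
  let v := checkConjLoop hop_ind i (PySem.List.pyGetD hop_ind i 0)
  if v ≠ 0 then decide (v < 0)
  else decide (PySem.List.pyGetD hop_ind 3 0 > PySem.List.pyGetD hop_ind 4 0)

-- ===== PRECONDITION & SPEC =====
-- Pre_ holds exactly on the inputs where Python A returns (no IndexError): the start index is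
-- in range, every component index the scan actually visits is in range, and if the scan ends
-- with all visited components zero the list has the 5 entries needed to read indices 3 and 4.
def Pre_check_conj (hop_ind : List Int) (i : Int) : Prop :=
  PySem.Raise.InRange hop_ind.length i ∧
  (∀ t ∈ List.range ((2 - i).toNat + 1),
     (∀ s ∈ List.range t, PySem.List.pyGetD hop_ind (i + s) 0 = 0) →
     PySem.Raise.InRange hop_ind.length (i + t)) ∧
  ((∀ t ∈ List.range ((2 - i).toNat + 1), PySem.List.pyGetD hop_ind (i + t) 0 = 0) →
     5 ≤ hop_ind.length)
instance (hop_ind : List Int) (i : Int) : Decidable (Pre_check_conj hop_ind i) := by unfold Pre_check_conj; infer_instance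

def pvWitness_check_conj : List Int × Int := ([0, 0, 1, 4, 2], 0)

def Spec_check_conj (hop_ind : List Int) (i : Int) (out : Bool) : Prop := out = check_conj_alt hop_ind i
instance (hop_ind : List Int) (i : Int) (out : Bool) : Decidable (Spec_check_conj hop_ind i out) := by unfold Spec_check_conj; infer_instance

-- ===== CLAIM (what is proved, stated in full; the proofs are below) =====
def Claim_equal_check_conj : Prop := ∀ (hop_ind : List Int) (i : Int), Dom_check_conj hop_ind i → Pre_check_conj hop_ind i → Spec_check_conj hop_ind i (check_conj hop_ind i)

-- ===== LEMMAS AND PROOFS =====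

-- A's recursion and B's loop agree for every i (no precondition needed: both ports
-- total via the pyGetD default, and they read the same cells in the same order).
theorem check_conj_eq_alt (hop_ind : List Int) (i : Int) :
    check_conj hop_ind i = check_conj_alt hop_ind i := by
  rw [check_conj, check_conj_alt, checkConjLoop]
  set v := PySem.List.pyGetD hop_ind i 0 with hv
  by_cases h0 : v = 0
  · simp only [h0]
    by_cases h2 : i < 2
    · simp only [h2, lt_irrefl, gt_iff_lt, if_true, if_false]
      have := check_conj_eq_alt hop_ind (i + 1)
      rw [check_conj_alt] at this
      simpa [h2] using this
    · simp [h2]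
  · by_cases hp : v > 0
    · simp [hp, h0, not_lt.mpr (le_of_lt hp), ne_eq]
    · have hn : v < 0 := lt_of_le_of_ne (not_lt.mp hp) h0
      simp [hn, h0, not_lt.mpr (le_of_lt hn)]
termination_by (2 - i).toNat
decreasing_by omega

-- ===== VERDICT (by name: the statement is the Claim_ definition above) =====
theorem check_conj_spec : Claim_equal_check_conj := by
  intro hop_ind i _ _
  unfold Spec_check_conj
  exact check_conj_eq_alt hop_ind i
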